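-- pv_equiv track=rewrite | github.com/nkswalih/leetcode | 1869-longer-contiguous-segments-of-ones-than-zeros/1869-longer-contiguous-segments-of-ones-than-zeros.py | checkZeroOnes
-- ===== SOURCE A (Python) =====
-- def checkZeroOnes(s):
--     max1 = 0
--     max0 = 0
--     count1 = 0
--     count0 = 0
--     for i in s:
--         if i == "1":
--             count1+=1
--             count0=0
--             max1 = max(max1, count1)
--
--         else:
--             count0+=1
--             count1=0
--             max0 = max(max0, count0)
--     return max1 > max0
-- ===== SOURCE B (Python) =====
-- def checkZeroOnes(s):
--     # Build a run-length encoding of the string (grouping on "is this char '1'"),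
--     # then reduce: compare the longest 1-run against the longest other-run.
--     runs = []  # list of (is_one, run_length) for each maximal block
--     for c in s:
--         b = c == "1"
--         if runs and runs[-1][0] == b:
--             runs[-1] = (b, runs[-1][1] + 1)
--         else:
--             runs.append((b, 1))
--     max1 = max((n for b, n in runs if b), default=0)
--     max0 = max((n for b, n in runs if not b), default=0)
--     return max1 > max0
-- ===== Notes on version B (the rewrite author's own statement) =====
-- stated objective: alternative
-- what changed: A tracks running counters with resets in one pass; B first builds the run-length encoding of the string as data and then reduces it with max-per-symbol.
import Mathlib
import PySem

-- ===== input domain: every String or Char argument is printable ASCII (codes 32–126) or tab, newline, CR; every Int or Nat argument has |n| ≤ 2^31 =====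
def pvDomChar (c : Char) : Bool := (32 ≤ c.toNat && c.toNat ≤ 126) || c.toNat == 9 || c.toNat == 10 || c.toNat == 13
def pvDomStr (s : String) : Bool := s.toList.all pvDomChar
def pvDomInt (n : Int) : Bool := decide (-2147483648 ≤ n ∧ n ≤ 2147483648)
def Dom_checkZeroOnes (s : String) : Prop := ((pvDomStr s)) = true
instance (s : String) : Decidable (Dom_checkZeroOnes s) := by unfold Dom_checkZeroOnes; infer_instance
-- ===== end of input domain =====

-- B builds the run-length encoding of the string as data and then reduces it with a
-- max per symbol, instead of A's single pass with resetting counters (objective: alternative).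


-- ===== PORT A =====
-- state = (max1, max0, count1, count0)
def pvStepA (st : Int × Int × Int × Int) (i : Char) : Int × Int × Int × Int :=
  let (max1, max0, count1, count0) := st
  if i == '1' then
    (max max1 (count1 + 1), max0, count1 + 1, 0)
  else
    (max1, max max0 (count0 + 1), 0, count0 + 1)

def checkZeroOnes (s : String) : Bool :=
  let r := s.toList.foldl pvStepA (0, 0, 0, 0)
  decide (r.2.1 < r.1)   -- max1 > max0

-- ===== PORT B =====
def pvStepB (runs : List (Bool × Int)) (c : Char) : List (Bool × Int) :=
  let b := c == '1'
  match runs.getLast? with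
  | some last =>
      if last.1 == b then runs.dropLast ++ [(b, last.2 + 1)]   -- runs[-1] = (b, runs[-1][1] + 1)
      else runs ++ [(b, 1)]
  | none => runs ++ [(b, 1)]

def checkZeroOnes_alt (s : String) : Bool :=
  let runs := s.toList.foldl pvStepB []
  let max1 := (PySem.List.max? ((runs.filter (fun p => p.1)).map Prod.snd) id).getD 0
  let max0 := (PySem.List.max? ((runs.filter (fun p => !p.1)).map Prod.snd) id).getD 0
  decide (max0 < max1)

-- ===== PRECONDITION & SPEC =====
def Spec_checkZeroOnes (s : String) (out : Bool) : Prop := out = checkZeroOnes_alt s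
instance (s : String) (out : Bool) : Decidable (Spec_checkZeroOnes s out) := by unfold Spec_checkZeroOnes; infer_instance

-- ===== CLAIM (what is proved, stated in full; the proofs are below) =====
def Claim_equal_checkZeroOnes : Prop := ∀ (s : String), Dom_checkZeroOnes s → Spec_checkZeroOnes s (checkZeroOnes s)

-- ===== LEMMAS AND PROOFS =====

-- longest run recorded for symbol b, as a plain foldl max over the run lengths
def pvMx (runs : List (Bool × Int)) (b : Bool) : Int :=
  ((runs.filter (fun p => p.1 == b)).map Prod.snd).foldl max 0

-- coupling invariant between A's counter state and B's runs list
def pvInv (runs : List (Bool × Int)) (m1 m0 c1 c0 : Int) : Prop :=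
  m1 = pvMx runs true ∧ m0 = pvMx runs false ∧ (∀ p ∈ runs, 0 < p.2) ∧
  ((runs = [] ∧ c1 = 0 ∧ c0 = 0) ∨
   (∃ init b n, runs = init ++ [(b, n)] ∧
      (if b then c1 = n ∧ c0 = 0 else c0 = n ∧ c1 = 0)))

lemma pvMx_append (runs : List (Bool × Int)) (b b' : Bool) (n : Int) :
    pvMx (runs ++ [(b', n)]) b = if b' == b then max (pvMx runs b) n else pvMx runs b := by
  by_cases h : b' = b <;> simp [pvMx, h, List.filter_append, List.map_append]

lemma pvPos_append (runs : List (Bool × Int)) (x : Bool × Int)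
    (hpos : ∀ p ∈ runs, 0 < p.2) (hx : 0 < x.2) : ∀ p ∈ runs ++ [x], 0 < p.2 := by
  intro p hp
  rcases List.mem_append.mp hp with h | h
  · exact hpos p h
  · simp at h; subst h; exact hx

lemma pvInv_step (runs : List (Bool × Int)) (m1 m0 c1 c0 : Int) (c : Char)
    (h : pvInv runs m1 m0 c1 c0) :
    pvInv (pvStepB runs c) (pvStepA (m1, m0, c1, c0) c).1 (pvStepA (m1, m0, c1, c0) c).2.1
      (pvStepA (m1, m0, c1, c0) c).2.2.1 (pvStepA (m1, m0, c1, c0) c).2.2.2 := by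
  obtain ⟨hm1, hm0, hpos, hlast⟩ := h
  by_cases hc : c = '1'
  · -- the char is '1'
    have hbeq : (c == '1') = true := by simp [hc]
    have hA : pvStepA (m1, m0, c1, c0) c = (max m1 (c1 + 1), m0, c1 + 1, 0) := by
      simp [pvStepA, hbeq]
    rcases hlast with ⟨h0, h1, h2⟩ | ⟨init, bb, n, hruns, hcc⟩
    · subst h0 h1 h2
      have hB : pvStepB [] c = [(true, 1)] := by simp [pvStepB, hbeq]
      rw [hA, hB]
      refine ⟨?_, ?_, ?_, Or.inr ⟨[], true, 1, rfl, by simp⟩⟩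
      · rw [hm1]; simp [pvMx]
      · rw [hm0]; simp [pvMx]
      · intro p hp; simp at hp; subst hp; omega
    · have hgl : runs.getLast? = some (bb, n) := by simp [hruns]
      have hdl : runs.dropLast = init := by simp [hruns]
      have hn : 0 < n := hpos (bb, n) (by simp [hruns])
      have hposInit : ∀ p ∈ init, 0 < p.2 := fun p hp => hpos p (by simp [hruns, hp])
      by_cases hbb : bb = true
      · -- extend the trailing 1-run
        subst hbb
        rw [if_pos rfl] at hcc
        obtain ⟨hc1, hc0⟩ := hcc
        have hB : pvStepB runs c = init ++ [(true, n + 1)] := by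
          simp [pvStepB, hbeq, hgl, hdl]
        rw [hA, hB]
        refine ⟨?_, ?_, ?_, Or.inr ⟨init, true, n + 1, rfl, by simp [hc1]⟩⟩
        · rw [hm1, hruns, pvMx_append, pvMx_append]; simp [hc1]
        · rw [hm0, hruns, pvMx_append, pvMx_append]; simp
        · exact pvPos_append _ _ hposInit (by simp; omega)
      · -- a new 1-run starts after a 0-run
        have hbb' : bb = false := by simpa using hbb
        subst hbb'
        rw [if_neg (by simp)] at hcc
        obtain ⟨hc0, hc1⟩ := hcc
        have hB : pvStepB runs c = runs ++ [(true, 1)] := by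
          simp [pvStepB, hbeq, hgl]
        rw [hA, hB]
        refine ⟨?_, ?_, ?_, Or.inr ⟨runs, true, 1, rfl, by simp [hc1]⟩⟩
        · rw [hm1, pvMx_append]; simp [hc1]
        · rw [hm0, pvMx_append]; simp
        · exact pvPos_append _ _ hpos (by simp)
  · -- the char is not '1'
    have hbeq : (c == '1') = false := by simp [hc]
    have hA : pvStepA (m1, m0, c1, c0) c = (m1, max m0 (c0 + 1), 0, c0 + 1) := by
      simp [pvStepA, hbeq]
    rcases hlast with ⟨h0, h1, h2⟩ | ⟨init, bb, n, hruns, hcc⟩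
    · subst h0 h1 h2
      have hB : pvStepB [] c = [(false, 1)] := by simp [pvStepB, hbeq]
      rw [hA, hB]
      refine ⟨?_, ?_, ?_, Or.inr ⟨[], false, 1, rfl, by simp⟩⟩
      · rw [hm1]; simp [pvMx]
      · rw [hm0]; simp [pvMx]
      · intro p hp; simp at hp; subst hp; omega
    · have hgl : runs.getLast? = some (bb, n) := by simp [hruns]
      have hdl : runs.dropLast = init := by simp [hruns]
      have hn : 0 < n := hpos (bb, n) (by simp [hruns])
      have hposInit : ∀ p ∈ init, 0 < p.2 := fun p hp => hpos p (by simp [hruns, hp])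
      by_cases hbb : bb = true
      · -- a new 0-run starts after a 1-run
        subst hbb
        rw [if_pos rfl] at hcc
        obtain ⟨hc1, hc0⟩ := hcc
        have hB : pvStepB runs c = runs ++ [(false, 1)] := by
          simp [pvStepB, hbeq, hgl]
        rw [hA, hB]
        refine ⟨?_, ?_, ?_, Or.inr ⟨runs, false, 1, rfl, by simp [hc0]⟩⟩
        · rw [hm1, pvMx_append]; simp
        · rw [hm0, pvMx_append]; simp [hc0]
        · exact pvPos_append _ _ hpos (by simp)
      · -- extend the trailing 0-run
        have hbb' : bb = false := by simpa using hbb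
        subst hbb'
        rw [if_neg (by simp)] at hcc
        obtain ⟨hc0, hc1⟩ := hcc
        have hB : pvStepB runs c = init ++ [(false, n + 1)] := by
          simp [pvStepB, hbeq, hgl, hdl]
        rw [hA, hB]
        refine ⟨?_, ?_, ?_, Or.inr ⟨init, false, n + 1, rfl, by simp [hc0]⟩⟩
        · rw [hm1, hruns, pvMx_append, pvMx_append]; simp
        · rw [hm0, hruns, pvMx_append, pvMx_append]; simp [hc0]
        · exact pvPos_append _ _ hposInit (by simp; omega)

lemma pvLoop (cs : List Char) : ∀ (runs : List (Bool × Int)) (m1 m0 c1 c0 : Int),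
    pvInv runs m1 m0 c1 c0 →
    pvInv (cs.foldl pvStepB runs)
      (cs.foldl pvStepA (m1, m0, c1, c0)).1
      (cs.foldl pvStepA (m1, m0, c1, c0)).2.1
      (cs.foldl pvStepA (m1, m0, c1, c0)).2.2.1
      (cs.foldl pvStepA (m1, m0, c1, c0)).2.2.2 := by
  induction cs with
  | nil => intro runs m1 m0 c1 c0 h; simpa using h
  | cons c cs ih =>
      intro runs m1 m0 c1 c0 h
      have h' := pvInv_step runs m1 m0 c1 c0 c h
      simpa using ih (pvStepB runs c) _ _ _ _ h'

-- the exact accumulator function inside PySem.List.max? at key = id on Int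
def pvMaxStep (acc : Option Int) (x : Int) : Option Int :=
  match acc with
  | none => some x
  | some m => if id m < id x then some x else some m

lemma pvMaxStep_some (m x : Int) : pvMaxStep (some m) x = some (max m x) := by
  unfold pvMaxStep
  simp only [id_eq]
  split
  · next h => rw [max_eq_right (le_of_lt h)]
  · next h => rw [max_eq_left (Int.not_lt.mp h)]

lemma pvMaxAux (xs : List Int) : ∀ (m : Int),
    List.foldl pvMaxStep (some m) xs = some (xs.foldl max m) := by
  induction xs with
  | nil => intro m; rfl
  | cons x xs ih => intro m; rw [List.foldl_cons, pvMaxStep_some, ih, List.foldl_cons]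

lemma pvMax?_getD_pos (xs : List Int) (h : ∀ x ∈ xs, 0 < x) :
    (PySem.List.max? xs id).getD 0 = xs.foldl max 0 := by
  have hdef : PySem.List.max? xs (id : Int → Int) = List.foldl pvMaxStep none xs := by
    rw [PySem.List.max?]
    congr 1
    funext acc x
    cases acc <;> rfl
  rw [hdef]
  cases xs with
  | nil => rfl
  | cons x xs =>
      have hx : 0 < x := h x (by simp)
      rw [List.foldl_cons]
      show (List.foldl pvMaxStep (some x) xs).getD 0 = List.foldl max (max 0 x) xs
      rw [pvMaxAux, Option.getD_some, max_eq_right hx.le]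

-- ===== VERDICT (by name: the statement is the Claim_ definition above) =====
theorem checkZeroOnes_spec : Claim_equal_checkZeroOnes := by
  intro s _
  unfold Spec_checkZeroOnes checkZeroOnes checkZeroOnes_alt
  have h0 : pvInv [] 0 0 0 0 := ⟨rfl, rfl, by simp, Or.inl ⟨rfl, rfl, rfl⟩⟩
  have h := pvLoop s.toList [] 0 0 0 0 h0
  obtain ⟨hm1, hm0, hpos, -⟩ := h
  set R := s.toList.foldl pvStepB [] with hR
  have hp1 : ∀ x ∈ (R.filter (fun p => p.1)).map Prod.snd, 0 < x := by
    intro x hx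
    simp only [List.mem_map, List.mem_filter] at hx
    obtain ⟨p, ⟨hp, -⟩, rfl⟩ := hx
    exact hpos p hp
  have hp0 : ∀ x ∈ (R.filter (fun p => !p.1)).map Prod.snd, 0 < x := by
    intro x hx
    simp only [List.mem_map, List.mem_filter] at hx
    obtain ⟨p, ⟨hp, -⟩, rfl⟩ := hx
    exact hpos p hp
  simp only []
  rw [pvMax?_getD_pos _ hp1, pvMax?_getD_pos _ hp0]
  have e1 : ((R.filter (fun p => p.1)).map Prod.snd).foldl max 0 = pvMx R true := by
    simp [pvMx]
  have e0 : ((R.filter (fun p => !p.1)).map Prod.snd).foldl max 0 = pvMx R false := by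
    simp [pvMx]
  rw [e1, e0, ← hm1, ← hm0]
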